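-- pv_equiv track=rewrite | github.com/InfantIvan/DailyChallenge | base_validator.py | show_valid_digits
-- ===== SOURCE A (Python) =====
-- def show_valid_digits(base):
--     """Show what digits are valid for a given base"""
--     if base < 2 or base > 36:
--         return "Invalid base: must be between 2 and 36"
--
--     valid_digits = []
--
--     # Add numeric digits (0-9)
--     for i in range(min(10, base)):
--         valid_digits.append(str(i))
--
--     # Add letter digits (A-Z) if base > 10
--     if base > 10:
--         for i in range(10, base):
--             valid_digits.append(chr(ord('A') + i - 10))
--
--     return ', '.join(valid_digits)
-- ===== SOURCE B (Python) =====
-- ALPHA = '0123456789ABCDEFGHIJKLMNOPQRSTUVWXYZ'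
--
-- def show_valid_digits(base):
--     """Show what digits are valid for a given base"""
--     if base < 2 or base > 36:
--         return "Invalid base: must be between 2 and 36"
--     return ', '.join(ALPHA[:base])
-- ===== Notes on version B (the rewrite author's own statement) =====
-- stated objective: idiomatic
-- what changed: B replaces the two generating loops and the chr/ord arithmetic with a single slice of a precomputed digit alphabet joined directly; B has no loops at all.
import Mathlib
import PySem

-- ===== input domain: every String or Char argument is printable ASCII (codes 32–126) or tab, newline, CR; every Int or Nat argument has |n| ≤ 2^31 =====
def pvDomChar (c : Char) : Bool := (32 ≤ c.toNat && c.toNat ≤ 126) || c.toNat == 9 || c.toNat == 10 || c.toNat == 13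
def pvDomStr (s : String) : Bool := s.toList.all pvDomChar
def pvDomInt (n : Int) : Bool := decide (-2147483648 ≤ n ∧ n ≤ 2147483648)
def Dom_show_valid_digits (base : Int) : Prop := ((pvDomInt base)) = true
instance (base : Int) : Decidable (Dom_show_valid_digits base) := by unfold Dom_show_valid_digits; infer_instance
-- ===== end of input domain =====

-- B replaces A's two generating loops and chr/ord arithmetic with one slice of a precomputed alphabet (idiomatic; same cost).


-- ===== PORT A =====
def show_valid_digits (base : Int) : String :=
  if base < 2 ∨ base > 36 then "Invalid base: must be between 2 and 36"
  else
    let valid_digits : List String :=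
      (PySem.List.pyRange 0 (min 10 base) 1).foldl
        (fun acc i => acc ++ [PySem.Int.toStr i]) []
    let valid_digits : List String :=
      if base > 10 then
        (PySem.List.pyRange 10 base 1).foldl
          (fun acc i => acc ++ [String.ofList [Char.ofNat ((65 + i - 10).toNat)]]) valid_digits
      else valid_digits
    PySem.Str.join ", " valid_digits

-- ===== PORT B =====
def pvAlpha : String := "0123456789ABCDEFGHIJKLMNOPQRSTUVWXYZ"

def show_valid_digits_alt (base : Int) : String :=
  if base < 2 ∨ base > 36 then "Invalid base: must be between 2 and 36"
  else
    PySem.Str.join ", "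
      ((PySem.List.slice pvAlpha.toList none (some base)).map (fun c => String.ofList [c]))

-- ===== PRECONDITION & SPEC =====
def Spec_show_valid_digits (base : Int) (out : String) : Prop := out = show_valid_digits_alt base
instance (base : Int) (out : String) : Decidable (Spec_show_valid_digits base out) := by unfold Spec_show_valid_digits; infer_instance

-- ===== CLAIM (what is proved, stated in full; the proofs are below) =====
def Claim_equal_show_valid_digits : Prop := ∀ (base : Int), Dom_show_valid_digits base → Spec_show_valid_digits base (show_valid_digits base)

-- ===== LEMMAS AND PROOFS =====
-- A's digit list and B's digit list, factored out so the final equality reduces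
-- (by congrArg) to a List-String equality checked once for all 35 admissible bases.
def pvLa (base : Int) : List String :=
  let valid_digits : List String :=
    (PySem.List.pyRange 0 (min 10 base) 1).foldl
      (fun acc i => acc ++ [PySem.Int.toStr i]) []
  if base > 10 then
    (PySem.List.pyRange 10 base 1).foldl
      (fun acc i => acc ++ [String.ofList [Char.ofNat ((65 + i - 10).toNat)]]) valid_digits
  else valid_digits

def pvLb (base : Int) : List String :=
  (PySem.List.slice pvAlpha.toList none (some base)).map (fun c => String.ofList [c])

theorem pvA_eq (base : Int) : show_valid_digits base =
    if base < 2 ∨ base > 36 then "Invalid base: must be between 2 and 36"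
    else PySem.Str.join ", " (pvLa base) := rfl

theorem pvB_eq (base : Int) : show_valid_digits_alt base =
    if base < 2 ∨ base > 36 then "Invalid base: must be between 2 and 36"
    else PySem.Str.join ", " (pvLb base) := rfl

theorem pvKey : ∀ k ∈ List.range 35, pvLa (2 + (k : Int)) = pvLb (2 + (k : Int)) := by decide

-- ===== VERDICT (by name: the statement is the Claim_ definition above) =====
theorem show_valid_digits_spec : Claim_equal_show_valid_digits := by
  intro base _
  unfold Spec_show_valid_digits
  rw [pvA_eq, pvB_eq]
  by_cases h : base < 2 ∨ base > 36
  · rw [if_pos h, if_pos h]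
  · rw [if_neg h, if_neg h]
    have hk : base = 2 + (((base - 2).toNat : Nat) : Int) := by omega
    rw [hk]
    exact congrArg (PySem.Str.join ", ")
      (pvKey _ (by simp only [List.mem_range]; omega))
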